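-- pv_equiv track=rewrite | github.com/Neminem1203/Puzzles | DailyCodingProblem/sentenceReconstruction.py | sentenceReconstruction
-- ===== SOURCE A (Python) =====
-- def sentenceReconstruction(dictionary, sentence):
--     returnSentence = []
--     while(sentence):
--         wordRemoved = False
--         for i in dictionary:
--             if i == sentence[:len(i)]:
--                 returnSentence.append(i)
--                 sentence = sentence[len(i):]
--                 wordRemoved = True
--                 break
--         if(not wordRemoved):
--             return None
--     return returnSentence
-- ===== SOURCE B (Python) =====
-- def sentenceReconstruction(dictionary, sentence):
--     # Index: first occurrence index of each word, plus the distinct word lengths.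
--     firstIdx = {}
--     lengths = []
--     for idx, w in enumerate(dictionary):
--         if w not in firstIdx:
--             firstIdx[w] = idx
--         if len(w) not in lengths:
--             lengths.append(len(w))
--     out = []
--     pos = 0
--     n = len(sentence)
--     while pos < n:
--         best = None
--         for L in lengths:
--             j = firstIdx.get(sentence[pos:pos + L])
--             if j is not None and (best is None or j < best):
--                 best = j
--         if best is None:
--             return None
--         w = dictionary[best]
--         out.append(w)
--         pos += len(w)
--     return out
-- ===== Notes on version B (the rewrite author's own statement) =====
-- stated objective: faster
-- what changed: A rescans the whole dictionary at every position; B precomputes a word->first-index hash map and the list of distinct word lengths once, then at each position probes one substring per distinct length and takes the minimal index, which equals A's first-match-in-dictionary-order choice.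
import Mathlib
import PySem

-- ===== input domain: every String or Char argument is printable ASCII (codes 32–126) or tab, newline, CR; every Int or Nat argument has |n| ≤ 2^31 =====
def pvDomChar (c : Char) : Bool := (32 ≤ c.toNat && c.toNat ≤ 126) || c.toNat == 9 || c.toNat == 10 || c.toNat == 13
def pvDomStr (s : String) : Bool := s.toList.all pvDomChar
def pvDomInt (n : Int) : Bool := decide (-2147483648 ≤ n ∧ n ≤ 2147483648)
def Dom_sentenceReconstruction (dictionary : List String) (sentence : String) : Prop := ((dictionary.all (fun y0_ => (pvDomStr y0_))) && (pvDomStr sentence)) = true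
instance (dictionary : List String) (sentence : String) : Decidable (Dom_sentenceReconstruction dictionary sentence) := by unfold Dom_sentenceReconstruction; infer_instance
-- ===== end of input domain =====

-- B replaces A's per-step linear scan of the whole dictionary with a first-occurrence index
-- (word -> first index) plus the list of distinct word lengths, probed once per length at each
-- position (objective: faster when the dictionary is large). Return-value equivalence only; no mutation.

-- ===== PORT A =====
-- inner 'for i in dictionary: if i == sentence[:len(i)]: break' loop
def srFind (dictionary : List String) (sentence : String) : Option String :=
  match dictionary with
  | [] => none
  | i :: rest =>
      if i == PySem.Str.slice sentence none (some (PySem.Str.len i)) then some i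
      else srFind rest sentence

-- the 'while(sentence)' loop; fuel (length+1) only makes the recursion structural — it is never
-- exhausted on a run where the Python loop terminates (each step before the last removes ≥ 1 character)
def srLoopA (dictionary : List String) : Nat → String → List String → Option (List String)
  | 0, _, _ => none
  | fuel+1, sentence, returnSentence =>
      if sentence.toList = [] then some returnSentence
      else
        match srFind dictionary sentence with
        | some i => srLoopA dictionary fuel (PySem.Str.slice sentence (some (PySem.Str.len i)) none) (returnSentence ++ [i])
        | none => none

def sentenceReconstruction (dictionary : List String) (sentence : String) : Option (List String) :=
  srLoopA dictionary (sentence.toList.length + 1) sentence []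

-- ===== PORT B =====
-- for idx, w in enumerate(dictionary): if w not in firstIdx: firstIdx[w] = idx; if len(w) not in lengths: lengths.append(len(w))
def srIndex (dictionary : List String) : PySem.Dict String Int × List Int :=
  (PySem.List.enumerate dictionary).foldl
    (fun st p =>
      ((if st.1.contains p.2 then st.1 else st.1.insert p.2 p.1),
       (if PySem.Str.len p.2 ∈ st.2 then st.2 else st.2 ++ [PySem.Str.len p.2])))
    (PySem.Dict.empty, [])

-- for L in lengths: j = firstIdx.get(sentence[pos:pos+L]); keep the smallest j
def srBest (firstIdx : PySem.Dict String Int) (lengths : List Int) (sentence : String) (pos : Int) : Option Int :=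
  lengths.foldl
    (fun best L =>
      match firstIdx.get? (PySem.Str.slice sentence (some pos) (some (pos + L))) with
      | some j => match best with
                  | none => some j
                  | some b => if j < b then some j else some b
      | none => best)
    none

-- the 'while pos < n' loop; same fuel remark as for srLoopA
def srLoopB (dictionary : List String) (firstIdx : PySem.Dict String Int) (lengths : List Int) (sentence : String) (n : Int) : Nat → Int → List String → Option (List String)
  | 0, _, _ => none
  | fuel+1, pos, out =>
      if pos < n then
        match srBest firstIdx lengths sentence pos with
        | none => none
        | some best =>
            -- dictionary[best]: best always holds a valid index (a value of firstIdx)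
            let w := PySem.List.pyGetD dictionary best ""
            srLoopB dictionary firstIdx lengths sentence n fuel (pos + PySem.Str.len w) (out ++ [w])
      else some out

def sentenceReconstruction_alt (dictionary : List String) (sentence : String) : Option (List String) :=
  let st := srIndex dictionary
  srLoopB dictionary st.1 st.2 sentence (PySem.Str.len sentence) (sentence.toList.length + 1) 0 []

-- ===== PRECONDITION & SPEC =====
def Spec_sentenceReconstruction (dictionary : List String) (sentence : String) (out : Option (List String)) : Prop := out = sentenceReconstruction_alt dictionary sentence
instance (dictionary : List String) (sentence : String) (out : Option (List String)) : Decidable (Spec_sentenceReconstruction dictionary sentence out) := by unfold Spec_sentenceReconstruction; infer_instance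

-- ===== CLAIM (what is proved, stated in full; the proofs are below) =====
def Claim_equal_sentenceReconstruction : Prop := ∀ (dictionary : List String) (sentence : String), Dom_sentenceReconstruction dictionary sentence → Spec_sentenceReconstruction dictionary sentence (sentenceReconstruction dictionary sentence)

-- ===== LEMMAS AND PROOFS =====

-- A's match test 'i == sentence[:len(i)]' is the prefix relation
lemma sr_match_iff (w t : String) :
    (w == PySem.Str.slice t none (some (PySem.Str.len w))) = true ↔ w.toList <+: t.toList := by
  rw [beq_iff_eq, ← String.toList_inj, PySem.Str.toList_slice, PySem.Chars.slice_eq_listSlice,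
    PySem.Str.len_eq, PySem.List.slice_to_natCast]
  exact (List.prefix_iff_eq_take).symm

-- generic: List.idxOf? across appending one element
lemma sr_idxOf?_append_singleton (D : List String) (x w : String) :
    List.idxOf? w (D ++ [x]) =
      (List.idxOf? w D).orElse (fun _ => if x = w then some D.length else none) := by
  induction D with
  | nil => by_cases h : x = w <;> simp [List.idxOf?_cons, h]
  | cons a D ih =>
    by_cases h : a = w
    · simp [List.idxOf?_cons, h]
    · simp only [List.cons_append, List.idxOf?_cons, beq_iff_eq, h, if_false, ih, List.length_cons]
      by_cases hx : x = w <;> cases hD : List.idxOf? w D <;> simp [hx, Option.orElse]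

-- one enumerate step of B's index-building fold
lemma srIndex_append (D : List String) (x : String) :
    srIndex (D ++ [x]) =
      ((if (srIndex D).1.contains x then (srIndex D).1 else (srIndex D).1.insert x (D.length : Int)),
       (if PySem.Str.len x ∈ (srIndex D).2 then (srIndex D).2 else (srIndex D).2 ++ [PySem.Str.len x])) := by
  simp [srIndex, PySem.List.enumerate_append, PySem.List.enumerate_cons, PySem.List.enumerate_nil,
    List.foldl_append]

-- the firstIdx dict built by B holds the first-occurrence index of each dictionary word
lemma srIndex_get (D : List String) : ∀ w : String,
    (srIndex D).1.get? w = (List.idxOf? w D).map Int.ofNat := by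
  induction D using List.reverseRecOn with
  | nil => intro w; simp [srIndex, PySem.List.enumerate_nil, PySem.Dict.get?_empty]
  | append_singleton D x ih =>
    intro w
    rw [srIndex_append, sr_idxOf?_append_singleton]
    by_cases hc : (srIndex D).1.contains x = true
    · have hx : x ∈ D := by
        have h2 := PySem.Dict.contains_eq_isSome_get? (srIndex D).1 x
        rw [ih x] at h2
        by_contra hmem
        rw [List.idxOf?_eq_none_iff.mpr hmem] at h2
        simp [hc] at h2
      simp only [hc, if_true, ih w]
      cases hD : List.idxOf? w D with
      | some k => simp [Option.orElse]
      | none =>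
        have : x ≠ w := fun he => (List.idxOf?_eq_none_iff.mp hD) (he ▸ hx)
        simp [Option.orElse, this]
    · have hx : List.idxOf? x D = none := by
        cases hD : List.idxOf? x D with
        | none => rfl
        | some k =>
          have h2 := PySem.Dict.contains_eq_isSome_get? (srIndex D).1 x
          rw [ih x, hD] at h2
          simp at h2
          exact absurd h2 hc
      rw [if_neg hc]
      by_cases hw : w = x
      · subst hw
        rw [PySem.Dict.get?_insert_self, hx]
        simp [Option.orElse]
      · rw [PySem.Dict.get?_insert_of_ne _ _ hw, ih w]
        cases hD : List.idxOf? w D with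
        | some k => simp [Option.orElse]
        | none => simp [Option.orElse, show x ≠ w from fun h => hw h.symm]

-- the lengths list built by B holds exactly the lengths of dictionary words
lemma srIndex_lengths (D : List String) : ∀ L : Int,
    L ∈ (srIndex D).2 ↔ ∃ w ∈ D, PySem.Str.len w = L := by
  induction D using List.reverseRecOn with
  | nil => intro L; simp [srIndex, PySem.List.enumerate_nil]
  | append_singleton D x ih =>
    intro L
    rw [srIndex_append]
    show L ∈ (if PySem.Str.len x ∈ (srIndex D).2 then (srIndex D).2 else (srIndex D).2 ++ [PySem.Str.len x]) ↔ _
    split_ifs with h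
    · rw [ih L]
      constructor
      · rintro ⟨w, hw, rfl⟩; exact ⟨w, by simp [hw], rfl⟩
      · rintro ⟨w, hw, rfl⟩
        rcases List.mem_append.mp hw with hw | hw
        · exact ⟨w, hw, rfl⟩
        · simp at hw; subst hw; exact (ih _).mp h
    · rw [List.mem_append]
      simp only [List.mem_singleton, ih L]
      constructor
      · rintro (⟨w, hw, rfl⟩ | rfl)
        · exact ⟨w, by simp [hw], rfl⟩
        · exact ⟨x, by simp, rfl⟩
      · rintro ⟨w, hw, rfl⟩
        rcases List.mem_append.mp hw with hw | hw
        · exact Or.inl ⟨w, hw, rfl⟩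
        · simp at hw; subst hw; exact Or.inr rfl

-- A's scan characterised: no word is a prefix
lemma srFind_eq_none_iff (D : List String) (t : String) :
    srFind D t = none ↔ ∀ w ∈ D, ¬ w.toList <+: t.toList := by
  induction D with
  | nil => simp [srFind]
  | cons a D ih =>
    rw [srFind]
    by_cases h : (a == PySem.Str.slice t none (some (PySem.Str.len a))) = true
    · rw [if_pos h]
      constructor
      · intro hcon; exact absurd hcon (by simp)
      · intro hall; exact absurd ((sr_match_iff a t).mp h) (hall a (by simp))
    · rw [if_neg h, ih]
      constructor
      · intro hall w hw
        rcases List.mem_cons.mp hw with rfl | hw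
        · exact fun hp => h ((sr_match_iff w t).mpr hp)
        · exact hall w hw
      · intro hall w hw; exact hall w (List.mem_cons_of_mem _ hw)

-- A's scan characterised: the word at the first matching index
lemma srFind_eq_some_iff (D : List String) (t : String) (i : String) :
    srFind D t = some i ↔ ∃ m, ∃ h : m < D.length, D[m] = i ∧ D[m].toList <+: t.toList ∧
      ∀ k, ∀ _ : k < m, ¬ D[k].toList <+: t.toList := by
  induction D generalizing i with
  | nil => simp [srFind]
  | cons a D ih =>
    rw [srFind]
    by_cases h : (a == PySem.Str.slice t none (some (PySem.Str.len a))) = true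
    · rw [if_pos h]
      constructor
      · intro he
        have ha : a = i := Option.some.inj he
        exact ⟨0, Nat.succ_pos _, ha, by simpa [ha] using ((sr_match_iff i t).mp (ha ▸ h)),
          fun k hk => absurd hk (by omega)⟩
      · rintro ⟨m, hm, hDm, hpre, hfirst⟩
        cases m with
        | zero => rw [show a = i from by simpa using hDm]
        | succ m => exact absurd ((sr_match_iff a t).mp h) (by simpa using hfirst 0 (Nat.succ_pos m))
    · rw [if_neg h, ih i]
      constructor
      · rintro ⟨m, hm, hDm, hpre, hfirst⟩
        refine ⟨m + 1, by simpa using Nat.succ_lt_succ hm, by simpa using hDm, by simpa using hpre, ?_⟩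
        intro k hk
        cases k with
        | zero => simpa using fun hp => h ((sr_match_iff a t).mpr hp)
        | succ k => simpa using hfirst k (by omega)
      · rintro ⟨m, hm, hDm, hpre, hfirst⟩
        cases m with
        | zero => exact absurd ((sr_match_iff a t).mpr (by simpa using hpre)) h
        | succ m =>
          refine ⟨m, by simpa using hm, by simpa using hDm, by simpa using hpre, ?_⟩
          intro k hk
          simpa using hfirst (k + 1) (by omega)

-- B's min-tracking fold is the minimum of the successful lookups
lemma sr_foldl_min_aux (f : Int → Option Int) (ls : List Int) (b : Option Int) :
    ls.foldl
      (fun best L =>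
        match f L with
        | some j => match best with
                    | none => some j
                    | some b => if j < b then some j else some b
        | none => best) b
      = (b.toList ++ ls.filterMap f).min? := by
  induction ls generalizing b with
  | nil => cases b <;> simp [List.min?]
  | cons L ls ih =>
    rw [List.foldl_cons, List.filterMap_cons]
    cases hf : f L with
    | none => exact ih b
    | some j =>
      cases b with
      | none => exact ih (some j)
      | some b0 =>
        rw [ih]
        show ((if j < b0 then some j else some b0).toList ++ List.filterMap f ls).min?
           = ((some b0).toList ++ j :: List.filterMap f ls).min?
        have hmin : (if j < b0 then some j else some b0) = some (min b0 j) := by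
          rcases lt_or_ge j b0 with hlt | hge
          · rw [if_pos hlt, min_eq_right (le_of_lt hlt)]
          · rw [if_neg (not_lt.mpr hge), min_eq_left hge]
        rw [hmin]
        show (min b0 j :: List.filterMap f ls).min? = (b0 :: j :: List.filterMap f ls).min?
        simp [List.min?]

lemma srBest_eq_min? (fi : PySem.Dict String Int) (ls : List Int) (sent : String) (pos : Int) :
    srBest fi ls sent pos =
      (ls.filterMap (fun L => fi.get? (PySem.Str.slice sent (some pos) (some (pos + L))))).min? := by
  simpa using sr_foldl_min_aux (fun L => fi.get? (PySem.Str.slice sent (some pos) (some (pos + L)))) ls none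

-- the substring B probes at position p with a word's length is that word's candidate prefix
lemma sr_slice_toList (sent : String) (p ℓ : Nat) :
    (PySem.Str.slice sent (some (p : Int)) (some ((p : Int) + (ℓ : Int)))).toList =
      List.take ℓ (List.drop p sent.toList) := by
  rw [PySem.Str.toList_slice, PySem.Chars.slice_eq_listSlice, PySem.List.slice_natCast_add]

-- every candidate produced by B's probes is a matching dictionary index
lemma sr_cand_is_match (D : List String) (sent : String) (p : Nat) (j : Int)
    (hj : j ∈ (srIndex D).2.filterMap
      (fun L => (srIndex D).1.get? (PySem.Str.slice sent (some (p : Int)) (some ((p : Int) + L))))) :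
    ∃ k, ∃ h : k < D.length, j = (k : Int) ∧ D[k].toList <+: sent.toList.drop p := by
  rcases List.mem_filterMap.mp hj with ⟨L, hL, hget⟩
  rcases (srIndex_lengths D L).mp hL with ⟨w0, _, hlen⟩
  rw [PySem.Str.len_eq] at hlen
  rw [srIndex_get] at hget
  cases hix : List.idxOf? (PySem.Str.slice sent (some (p : Int)) (some ((p : Int) + L))) D with
  | none => rw [hix] at hget; exact absurd hget (by simp)
  | some k =>
    rw [hix] at hget
    simp only [Option.map_some, Option.some_inj, Int.ofNat_eq_natCast] at hget
    rcases List.idxOf?_eq_some_iff.mp hix with ⟨hklt, hDk, _⟩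
    refine ⟨k, hklt, hget.symm, ?_⟩
    rw [hDk, ← hlen, sr_slice_toList]
    exact List.take_prefix _ _

-- the first matching index is itself one of B's candidates
lemma sr_match_is_cand (D : List String) (sent : String) (p : Nat) (m : Nat) (hm : m < D.length)
    (hpre : D[m].toList <+: sent.toList.drop p)
    (hfirst : ∀ k, ∀ _ : k < m, ¬ D[k].toList <+: sent.toList.drop p) :
    (m : Int) ∈ (srIndex D).2.filterMap
      (fun L => (srIndex D).1.get? (PySem.Str.slice sent (some (p : Int)) (some ((p : Int) + L)))) := by
  apply List.mem_filterMap.mpr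
  refine ⟨PySem.Str.len (D[m]), (srIndex_lengths D _).mpr ⟨D[m], List.getElem_mem hm, rfl⟩, ?_⟩
  have hsub : PySem.Str.slice sent (some (p : Int)) (some ((p : Int) + PySem.Str.len (D[m]))) = D[m] := by
    rw [← String.toList_inj, PySem.Str.len_eq, sr_slice_toList]
    exact (List.prefix_iff_eq_take.mp hpre).symm
  rw [hsub, srIndex_get]
  have hidx : List.idxOf? (D[m]) D = some m := by
    apply List.idxOf?_eq_some_iff.mpr
    refine ⟨hm, rfl, ?_⟩
    intro k hk he
    exact hfirst k hk (he ▸ hpre)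
  rw [hidx]
  rfl

-- the two loops run in lockstep
lemma sr_loop_eq (D : List String) (sent : String) :
    ∀ fuel (t : String) (p : Nat) (acc : List String),
      t.toList = sent.toList.drop p → p ≤ sent.toList.length →
      srLoopA D fuel t acc =
        srLoopB D (srIndex D).1 (srIndex D).2 sent (PySem.Str.len sent) fuel (p : Int) acc := by
  intro fuel
  induction fuel with
  | zero => intro t p acc _ _; rfl
  | succ fuel ih =>
    intro t p acc ht hp
    rw [srLoopA, srLoopB]
    by_cases hE : t.toList = []
    · rw [if_pos hE]
      have hpn : p = sent.toList.length := by
        have := List.drop_eq_nil_iff.mp (ht ▸ hE)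
        omega
      rw [if_neg (by rw [PySem.Str.len_eq]; omega)]
    · rw [if_neg hE]
      have hplt : p < sent.toList.length := by
        by_contra hge
        exact hE (ht.trans (List.drop_eq_nil_iff.mpr (by omega)))
      rw [if_pos (by rw [PySem.Str.len_eq]; exact_mod_cast hplt)]
      cases hF : srFind D t with
      | none =>
        have hnone : ∀ w ∈ D, ¬ w.toList <+: sent.toList.drop p :=
          fun w hw => ht ▸ (srFind_eq_none_iff D t).mp hF w hw
        have hcand : ((srIndex D).2.filterMap
            (fun L => (srIndex D).1.get? (PySem.Str.slice sent (some (p : Int)) (some ((p : Int) + L))))) = [] := by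
          apply List.eq_nil_iff_forall_not_mem.mpr
          intro j hj
          rcases sr_cand_is_match D sent p j hj with ⟨k, hk, _, hpre⟩
          exact hnone _ (List.getElem_mem hk) hpre
        rw [srBest_eq_min?, hcand]
        rfl
      | some i =>
        rcases (srFind_eq_some_iff D t i).mp hF with ⟨m, hm, hDm, hpre, hfirst⟩
        rw [ht] at hpre hfirst
        have hbest : srBest (srIndex D).1 (srIndex D).2 sent (p : Int) = some (m : Int) := by
          rw [srBest_eq_min?]
          apply List.min?_eq_some_iff.mpr
          refine ⟨sr_match_is_cand D sent p m hm hpre hfirst, ?_⟩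
          intro j hj
          rcases sr_cand_is_match D sent p j hj with ⟨k, hk, rfl, hkpre⟩
          have : ¬ k < m := fun hlt => hfirst k hlt hkpre
          exact_mod_cast Nat.le_of_not_lt this
        rw [hbest]
        show srLoopA D fuel (PySem.Str.slice t (some (PySem.Str.len i))) (acc ++ [i]) =
          srLoopB D (srIndex D).1 (srIndex D).2 sent (PySem.Str.len sent) fuel
            ((p : Int) + PySem.Str.len (PySem.List.pyGetD D ((m : Int)) "")) (acc ++ [PySem.List.pyGetD D ((m : Int)) ""])
        have hw : PySem.List.pyGetD D ((m : Int)) "" = i := by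
          rw [PySem.List.pyGetD_eq_getElem D "" (by exact_mod_cast Nat.zero_le m) (by exact_mod_cast hm)]
          simpa using hDm
        show srLoopA D fuel (PySem.Str.slice t (some (PySem.Str.len i)) none) (acc ++ [i]) = _
        rw [hw]
        have hlen : PySem.Str.len i = ((i.toList.length : Nat) : Int) := PySem.Str.len_eq i
        have hle : i.toList.length ≤ sent.toList.length - p := by
          have h3 := hpre.length_le
          rw [hDm, List.length_drop] at h3
          exact h3
        have hrec := ih (PySem.Str.slice t (some (PySem.Str.len i)) none) (p + i.toList.length) (acc ++ [i])
          (by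
            rw [PySem.Str.toList_slice, PySem.Chars.slice_eq_listSlice, hlen,
              PySem.List.slice_from_natCast, ht, List.drop_drop])
          (by omega)
        rw [hrec, hlen]
        norm_cast

-- ===== VERDICT (by name: the statement is the Claim_ definition above) =====
theorem sentenceReconstruction_spec : Claim_equal_sentenceReconstruction := by
  intro D sent _
  unfold Spec_sentenceReconstruction sentenceReconstruction sentenceReconstruction_alt
  simpa using sr_loop_eq D sent (sent.toList.length + 1) sent 0 [] (by simp) (by simp)
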